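-- pv_equiv track=rewrite | github.com/AlexScotland/AdventOfCode | 2023/Day1/code.py | sliding_window_left_and_right
-- ===== SOURCE A (Python) =====
-- def sliding_window_left_and_right(input):
--     answer = False
--     left = 0
--     left_value = None
--     right_value = None
--     right = len(input) - 1
--     while not answer:
--         if input[left].isdigit() and left_value is None:
--             left_value = input[left]
--         if input[right].isdigit() and right_value is None:
--             right_value = input[right]
--         if right_value and left_value:
--             return int(left_value + right_value)
--         left += 1
--         right -= 1
-- ===== SOURCE B (Python) =====
-- def sliding_window_left_and_right(input):
--     digits = [c for c in input if c.isdigit()]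
--     return int(digits[0] + digits[-1])
-- ===== Notes on version B (the rewrite author's own statement) =====
-- stated objective: simpler
-- what changed: Replaces the bidirectional two-pointer scan with mutable sentinel state by a single forward pass collecting all digit characters, then combining the first and last collected digit.
import Mathlib
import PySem

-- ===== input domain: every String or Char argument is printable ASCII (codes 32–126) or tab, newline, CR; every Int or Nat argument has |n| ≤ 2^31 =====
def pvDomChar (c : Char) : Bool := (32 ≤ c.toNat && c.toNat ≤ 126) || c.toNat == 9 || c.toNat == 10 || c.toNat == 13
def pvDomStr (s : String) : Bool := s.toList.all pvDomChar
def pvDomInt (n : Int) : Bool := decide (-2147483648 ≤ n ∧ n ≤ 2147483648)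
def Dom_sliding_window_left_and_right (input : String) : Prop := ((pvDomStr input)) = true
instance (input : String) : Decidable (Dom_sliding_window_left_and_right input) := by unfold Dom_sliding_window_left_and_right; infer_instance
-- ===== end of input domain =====

-- B replaces A's bidirectional two-pointer scan (mutable sentinel state, early return) by a
-- single forward pass collecting the digit characters and combining the first and last one
-- (objective: simpler; same return value on every input where A returns).

-- ===== PORT A =====
-- A's while-loop: state (left, right, left_value, right_value); the recursion stops where
-- Python raises IndexError (pyGet? = none; those inputs are excluded by Pre_), returning 0 there

def pvLoopA (cs : List Char) (left right : Int) (lv rv : Option Char) : Int :=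
  match h1 : PySem.List.pyGet? cs left, PySem.List.pyGet? cs right with
  | some cl, some cr =>
    let lv' := if PySem.Chars.isdigit cl && lv.isNone then some cl else lv
    let rv' := if PySem.Chars.isdigit cr && rv.isNone then some cr else rv
    if rv'.isSome && lv'.isSome then
      (PySem.Int.ofStr? (String.mk [lv'.getD cl, rv'.getD cr])).getD 0
    else
      pvLoopA cs (left + 1) (right - 1) lv' rv'
  | _, _ => 0
termination_by (2 * (cs.length : Int) - left).toNat
decreasing_by
  have hin : left < (cs.length : Int) := by
    by_contra hc
    have : PySem.List.pyGet? cs left = none := by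
      rw [PySem.List.pyGet?_eq_none_iff]
      intro hR
      exact hc hR.2
    simp [this] at h1
  omega


def sliding_window_left_and_right (input : String) : Int :=
  pvLoopA input.toList 0 (PySem.Str.len input - 1) none none

-- ===== PORT B =====
def sliding_window_left_and_right_alt (input : String) : Int :=
  let digits := input.toList.filter PySem.Chars.isdigit
  match PySem.List.pyGet? digits 0, PySem.List.pyGet? digits (-1) with
  | some a, some b => (PySem.Int.ofStr? (String.mk [a, b])).getD 0
  | _, _ => 0

-- ===== PRECONDITION & SPEC =====
-- Pre_ excludes exactly the inputs with no digit character, on which the Python A raises IndexError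
def Pre_sliding_window_left_and_right (input : String) : Prop :=
  input.toList.any PySem.Chars.isdigit = true
instance (input : String) : Decidable (Pre_sliding_window_left_and_right input) := by
  unfold Pre_sliding_window_left_and_right; infer_instance

def pvWitness_sliding_window_left_and_right : String := "a1b2c"

def Spec_sliding_window_left_and_right (input : String) (out : Int) : Prop :=
  out = sliding_window_left_and_right_alt input
instance (input : String) (out : Int) : Decidable (Spec_sliding_window_left_and_right input out) := by
  unfold Spec_sliding_window_left_and_right; infer_instance

-- ===== CLAIM (what is proved, stated in full; the proofs are below) =====
def Claim_equal_sliding_window_left_and_right : Prop :=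
  ∀ (input : String), Dom_sliding_window_left_and_right input →
    Pre_sliding_window_left_and_right input →
    Spec_sliding_window_left_and_right input (sliding_window_left_and_right input)

-- ===== LEMMAS AND PROOFS =====

theorem pvLoopA_eq (cs : List Char) (hne : cs.filter PySem.Chars.isdigit ≠ []) :
    ∀ (m k : Nat), m + k = cs.length → k < cs.length →
    pvLoopA cs (k : Int) ((cs.length : Int) - 1 - (k : Int))
      ((cs.take k).filter PySem.Chars.isdigit).head?
      ((cs.drop (cs.length - k)).filter PySem.Chars.isdigit).getLast? =
    (PySem.Int.ofStr? (String.mk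
        [(cs.filter PySem.Chars.isdigit).head hne,
         (cs.filter PySem.Chars.isdigit).getLast hne])).getD 0 := by
  intro m
  induction m with
  | zero => intro k hmk hk; omega
  | succ m ih =>
    intro k hmk hk
    have hj : cs.length - 1 - k < cs.length := by omega
    have e1 : PySem.List.pyGet? cs (k : Int) = some cs[k] := by
      rw [PySem.List.pyGet?_natCast]; exact List.getElem?_eq_getElem hk
    have ejcast : ((cs.length : Int) - 1 - (k : Int)) = ((cs.length - 1 - k : Nat) : Int) := by
      omega
    have e2 : PySem.List.pyGet? cs ((cs.length : Int) - 1 - (k : Int)) =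
        some cs[cs.length - 1 - k] := by
      rw [ejcast, PySem.List.pyGet?_natCast]; exact List.getElem?_eq_getElem hj
    rw [pvLoopA]
    rw [e2]
    -- names for the state pieces
    set P := ((cs.take k).filter PySem.Chars.isdigit).head? with hP
    set Q := ((cs.drop (cs.length - k)).filter PySem.Chars.isdigit).getLast? with hQ
    have hcons : ∀ (c : Char) (t : List Char), (c :: t).getLast? = t.getLast?.or (some c) := by
      intro c t
      cases h : t.getLast? <;> simp [List.getLast?_cons, h]
    have htake : ((cs.take (k+1)).filter PySem.Chars.isdigit).head?
        = P.or (if PySem.Chars.isdigit cs[k] then some cs[k] else none) := by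
      rw [List.take_add_one, List.getElem?_eq_getElem hk]
      rw [show (some cs[k]).toList = [cs[k]] from rfl]
      rw [List.filter_append, List.head?_append, ← hP]
      congr 1
      rw [List.filter_cons]
      split <;> rfl
    have hdropj : cs.drop (cs.length - 1 - k) = cs[cs.length - 1 - k] :: cs.drop (cs.length - k) := by
      have h2 : cs.length - 1 - k + 1 = cs.length - k := by omega
      rw [List.drop_eq_getElem_cons hj, h2]
    have hdrop : ((cs.drop (cs.length - 1 - k)).filter PySem.Chars.isdigit).getLast?
        = Q.or (if PySem.Chars.isdigit cs[cs.length - 1 - k] then some cs[cs.length - 1 - k] else none) := by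
      rw [hdropj, List.filter_cons]
      split
      · rw [hcons, ← hQ]
      · rw [← hQ]
        cases Q <;> rfl
    have hlv : (if PySem.Chars.isdigit cs[k] && P.isNone then some cs[k] else P)
        = ((cs.take (k+1)).filter PySem.Chars.isdigit).head? := by
      rw [htake]
      cases hp : P <;> simp
    have hrv : (if PySem.Chars.isdigit cs[cs.length - 1 - k] && Q.isNone then some cs[cs.length - 1 - k] else Q)
        = ((cs.drop (cs.length - 1 - k)).filter PySem.Chars.isdigit).getLast? := by
      rw [hdrop]
      cases hq : Q <;> simp
    split
    case h_2 x h => exact absurd e1 (fun hc => (h _ _ hc rfl).elim)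
    case h_1 cl cr heq1 heq2 =>
    rw [e1] at heq1
    injection heq1 with hcl
    injection heq2 with hcr
    subst hcl; subst hcr
    rw [hlv, hrv]
    set L := ((cs.take (k+1)).filter PySem.Chars.isdigit).head? with hL
    set R := ((cs.drop (cs.length - 1 - k)).filter PySem.Chars.isdigit).getLast? with hR
    have hsplit : cs.filter PySem.Chars.isdigit
        = (cs.take (k+1)).filter PySem.Chars.isdigit ++ (cs.drop (k+1)).filter PySem.Chars.isdigit := by
      rw [← List.filter_append, List.take_append_drop]
    by_cases hboth : R.isSome && L.isSome
    · rw [if_pos hboth]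
      obtain ⟨hRs, hLs⟩ := Bool.and_eq_true_iff.mp hboth
      obtain ⟨a, ha⟩ := Option.isSome_iff_exists.mp hLs
      obtain ⟨b, hb⟩ := Option.isSome_iff_exists.mp hRs
      have hhead : (cs.filter PySem.Chars.isdigit).head? = some a := by
        rw [hsplit, List.head?_append, ← hL, ha]; rfl
      have hlast : (cs.filter PySem.Chars.isdigit).getLast? = some b := by
        have hsplit2 : cs.filter PySem.Chars.isdigit
            = (cs.take (cs.length - 1 - k)).filter PySem.Chars.isdigit
              ++ (cs.drop (cs.length - 1 - k)).filter PySem.Chars.isdigit := by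
          rw [← List.filter_append, List.take_append_drop]
        rw [hsplit2, List.getLast?_append, ← hR, hb]; rfl
      have ha' : (cs.filter PySem.Chars.isdigit).head hne = a := by
        have := List.head?_eq_head (l := cs.filter PySem.Chars.isdigit) hne
        rw [hhead] at this; exact (Option.some_inj.mp this).symm
      have hb' : (cs.filter PySem.Chars.isdigit).getLast hne = b := by
        have := List.getLast?_eq_getLast (l := cs.filter PySem.Chars.isdigit) hne
        rw [hlast] at this; exact (Option.some_inj.mp this).symm
      rw [ha, hb, ha', hb']
      rfl
    · rw [if_neg (by simpa using hboth)]
      have hklt : k + 1 < cs.length := by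
        by_contra hc
        have hk1 : k + 1 = cs.length := by omega
        have hLsome : L.isSome := by
          rw [hL, hk1, List.take_length]
          exact Option.isSome_iff_exists.mpr ⟨_, List.head?_eq_head hne⟩
        have hRsome : R.isSome := by
          have : cs.length - 1 - k = 0 := by omega
          rw [hR, this, List.drop_zero]
          exact Option.isSome_iff_exists.mpr ⟨_, List.getLast?_eq_getLast hne⟩
        simp [hLsome, hRsome] at hboth
      have := ih (k + 1) (by omega) hklt
      have harg1 : ((k : Int) + 1) = ((k + 1 : Nat) : Int) := by push_cast; ring
      have harg2 : ((cs.length : Int) - 1 - (k : Int) - 1) = ((cs.length : Int) - 1 - ((k+1 : Nat) : Int)) := by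
        push_cast; ring
      have harg3 : cs.length - (k + 1) = cs.length - 1 - k := by omega
      rw [harg1, harg2, hL, hR]
      rw [harg3] at this
      exact this

-- ===== VERDICT (by name: the statement is the Claim_ definition above) =====
theorem sliding_window_left_and_right_spec : Claim_equal_sliding_window_left_and_right := by
  intro input _ hpre
  have hne : input.toList.filter PySem.Chars.isdigit ≠ [] := by
    intro h
    rw [List.filter_eq_nil_iff] at h
    obtain ⟨c, hc, hd⟩ := List.any_eq_true.mp hpre
    exact h c hc hd
  have hlen : 0 < input.toList.length := by
    cases hcs : input.toList with
    | nil => rw [hcs] at hne; simp at hne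
    | cons a t => simp
  have h0 := pvLoopA_eq input.toList hne input.toList.length 0 (by omega) hlen
  unfold Spec_sliding_window_left_and_right sliding_window_left_and_right
    sliding_window_left_and_right_alt
  simp only [Nat.cast_zero, List.take_zero, List.filter_nil, List.head?_nil, Nat.sub_zero,
    List.drop_length, List.getLast?_nil, sub_zero] at h0
  have hlenstr : PySem.Str.len input - 1 = (input.toList.length : Int) - 1 := by
    simp [PySem.Str.len_eq]
  rw [hlenstr, h0]
  have hg0 : PySem.List.pyGet? (input.toList.filter PySem.Chars.isdigit) 0
      = some ((input.toList.filter PySem.Chars.isdigit).head hne) := by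
    rw [PySem.List.pyGet?_zero, ← List.head?_eq_getElem?]
    exact List.head?_eq_head hne
  have hg1 : PySem.List.pyGet? (input.toList.filter PySem.Chars.isdigit) (-1)
      = some ((input.toList.filter PySem.Chars.isdigit).getLast hne) := by
    rw [PySem.List.pyGet?_neg_one]
    exact List.getLast?_eq_getLast hne
  simp only [hg0, hg1]
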